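-- pv_equiv track=rewrite | github.com/chenzhiliang94/AutoAI | GraphDecomposition/Heuristic.py | get_all_backward_decomposition
-- ===== SOURCE A (Python) =====
-- def get_all_backward_decomposition(black_box_node_name, backward_search):
--     backward_decompositions = []
--     decomposition = [black_box_node_name]
--
--     for edge in backward_search[black_box_node_name]:
--         backward_decompositions.append(decomposition.copy())
--         decomposition.append(edge[1])
--     backward_decompositions.append(decomposition.copy())
--
--     return backward_decompositions
-- ===== SOURCE B (Python) =====
-- def get_all_backward_decomposition(black_box_node_name, backward_search):
--     path = [black_box_node_name] + [edge[1] for edge in backward_search[black_box_node_name]]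
--     return [path[:i + 1] for i in range(len(path))]
-- ===== Notes on version B (the rewrite author's own statement) =====
-- stated objective: simpler
-- what changed: Replaces the incremental grow-and-copy loop (append copy, then extend) with a two-phase build-then-slice: build the full path once, then return its growing prefixes by slicing.
import Mathlib
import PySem

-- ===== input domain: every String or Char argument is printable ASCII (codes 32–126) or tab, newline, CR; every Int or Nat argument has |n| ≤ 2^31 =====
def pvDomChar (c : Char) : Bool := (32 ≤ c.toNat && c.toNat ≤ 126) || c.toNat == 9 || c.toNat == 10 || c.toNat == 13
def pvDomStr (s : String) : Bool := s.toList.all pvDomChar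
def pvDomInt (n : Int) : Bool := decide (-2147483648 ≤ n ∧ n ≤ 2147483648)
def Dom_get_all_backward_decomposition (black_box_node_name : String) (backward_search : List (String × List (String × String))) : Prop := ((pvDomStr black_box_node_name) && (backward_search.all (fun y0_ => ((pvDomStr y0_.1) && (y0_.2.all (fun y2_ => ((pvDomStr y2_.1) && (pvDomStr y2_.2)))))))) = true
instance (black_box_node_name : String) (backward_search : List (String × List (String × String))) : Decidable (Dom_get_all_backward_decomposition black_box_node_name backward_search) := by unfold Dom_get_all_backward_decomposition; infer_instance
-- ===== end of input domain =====

-- B replaces A's incremental grow-and-copy loop by a build-then-slice two-phase structure (objective: simpler).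

-- ===== PORT A =====
-- A: grow `decomposition`, copying it into the output before each extension and once at the end.
def get_all_backward_decomposition (black_box_node_name : String) (backward_search : List (String × List (String × String))) : List (List String) :=
  let edges := ((PySem.Dict.mk backward_search).get? black_box_node_name).getD []
  let s := edges.foldl
    (fun (s : List (List String) × List String) edge => (s.1 ++ [s.2], s.2 ++ [edge.2]))
    ([], [black_box_node_name])
  s.1 ++ [s.2]

-- ===== PORT B =====
-- B: build the full path once, then return its growing prefixes by slicing.
def get_all_backward_decomposition_alt (black_box_node_name : String) (backward_search : List (String × List (String × String))) : List (List String) :=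
  let edges := ((PySem.Dict.mk backward_search).get? black_box_node_name).getD []
  let path := black_box_node_name :: edges.map (fun e => e.2)
  (List.range path.length).map (fun i => path.take (i + 1))

-- ===== PRECONDITION & SPEC =====
-- Pre_ excludes exactly the inputs where Python A raises KeyError: black_box_node_name not a key of backward_search.
def Pre_get_all_backward_decomposition (black_box_node_name : String) (backward_search : List (String × List (String × String))) : Prop :=
  ((PySem.Dict.mk backward_search).get? black_box_node_name).isSome = true
instance (black_box_node_name : String) (backward_search : List (String × List (String × String))) : Decidable (Pre_get_all_backward_decomposition black_box_node_name backward_search) := by unfold Pre_get_all_backward_decomposition; infer_instance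
def pvWitness_get_all_backward_decomposition : String × (List (String × List (String × String))) := ("a", [("a", [("b", "c")])])

def Spec_get_all_backward_decomposition (black_box_node_name : String) (backward_search : List (String × List (String × String))) (out : List (List String)) : Prop := out = get_all_backward_decomposition_alt black_box_node_name backward_search
instance (black_box_node_name : String) (backward_search : List (String × List (String × String))) (out : List (List String)) : Decidable (Spec_get_all_backward_decomposition black_box_node_name backward_search out) := by unfold Spec_get_all_backward_decomposition; infer_instance

-- ===== CLAIM (what is proved, stated in full; the proofs are below) =====
def Claim_equal_get_all_backward_decomposition : Prop := ∀ (black_box_node_name : String) (backward_search : List (String × List (String × String))), Dom_get_all_backward_decomposition black_box_node_name backward_search → Pre_get_all_backward_decomposition black_box_node_name backward_search → Spec_get_all_backward_decomposition black_box_node_name backward_search (get_all_backward_decomposition black_box_node_name backward_search)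

-- ===== LEMMAS AND PROOFS =====
-- Invariant of A's loop: starting from accumulator acc and current prefix dec, the final
-- output is acc followed by all the growing prefixes of dec ++ (second components of edges).
lemma loop_prefixes (edges : List (String × String)) (acc : List (List String)) (dec : List String) :
    ((edges.foldl
        (fun (s : List (List String) × List String) edge => (s.1 ++ [s.2], s.2 ++ [edge.2]))
        (acc, dec)).1 ++ [(edges.foldl
        (fun (s : List (List String) × List String) edge => (s.1 ++ [s.2], s.2 ++ [edge.2]))
        (acc, dec)).2])
    = acc ++ (List.range (edges.length + 1)).map
        (fun i => (dec ++ edges.map (fun e => e.2)).take (dec.length + i)) := by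
  induction edges generalizing acc dec with
  | nil => simp
  | cons e rest ih =>
    simp only [List.foldl_cons, List.map_cons, List.length_cons]
    rw [ih (acc ++ [dec]) (dec ++ [e.2]), List.append_assoc]
    congr 1
    conv_rhs => rw [List.range_succ_eq_map, List.range_succ_eq_map]
    simp only [List.map_cons, List.map_map, List.singleton_append]
    congr 1
    · simp
    rw [List.range_succ_eq_map]
    simp only [List.map_cons, List.map_map]
    congr 1
    · simp only [List.append_assoc, List.singleton_append, List.length_append,
        List.length_cons, List.length_nil]
    apply List.map_congr_left
    intro i _
    simp only [Function.comp_apply, List.append_assoc, List.singleton_append,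
      List.length_append, List.length_cons, List.length_nil]
    congr 1
    omega

-- ===== VERDICT (by name: the statement is the Claim_ definition above) =====
theorem get_all_backward_decomposition_spec : Claim_equal_get_all_backward_decomposition := by
  intro name bs _ _
  unfold Spec_get_all_backward_decomposition get_all_backward_decomposition get_all_backward_decomposition_alt
  rw [loop_prefixes _ [] [name]]
  simp [Nat.add_comm]
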